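-- pv_equiv track=rewrite | github.com/vivitas/simba | simba/multi_poly.py | poly_update
-- ===== SOURCE A (Python) =====
-- import string
-- import copy
--
-- K_NAME_FOR_CONSTANT = " "
--
-- K_ZERO_MONOM = {}
--
-- VARIABLE_DOMAIN = string.ascii_letters
--
-- def constant(monom):
-- 	if monom == K_ZERO_MONOM:
-- 		return 0;
-- 	if K_NAME_FOR_CONSTANT in monom:
-- 		return monom[K_NAME_FOR_CONSTANT]
-- 	return 1
--
-- def multiorder(monom, all_degrees=False):
-- 	result = []
-- 	if all_degrees:
-- 		variable_pool = VARIABLE_DOMAIN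
-- 	else:
-- 		variable_pool = monom
-- 	for variable in variable_pool:
-- 		if variable == K_NAME_FOR_CONSTANT:
-- 			continue
-- 		if variable in monom:
-- 			order = monom[variable]
-- 		else:
-- 			order = 0
-- 		result.append(order)
-- 	return result
--
-- def same(first_monom, second_monom, constant_matter=True):
-- 	return multiorder(first_monom, True) == multiorder(second_monom, True) and (not constant_matter or (constant(first_monom) == constant(second_monom)))
--
-- def add(first_poly, second_poly):
-- 	result = copy.deepcopy(first_poly)
-- 	for monom_second in second_poly:
-- 		found = False
-- 		for monom_result in result:
-- 			if same(monom_result, monom_second, False):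
-- 				found = True
-- 				monom_result[K_NAME_FOR_CONSTANT] = constant(monom_result) + constant(monom_second)
-- 				break
-- 		if not found:
-- 			result.append(monom_second)
-- 	final_result = []
-- 	for monom in result:
-- 		if constant(monom) != 0:
-- 			final_result.append(monom)
-- 	return final_result
--
-- def poly_update(poly):
-- 	updated = []
-- 	for monom in poly:
-- 		if constant(monom) != 0:
-- 			if (sum(multiorder(monom)) == 0):
-- 				updated = add(updated, [{K_NAME_FOR_CONSTANT:constant(monom)}])
-- 			else:
-- 				updated.append(copy.deepcopy(monom))
-- 	return updated
-- ===== SOURCE B (Python) =====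
-- import string
-- import copy
--
-- K_NAME_FOR_CONSTANT = " "
--
-- K_ZERO_MONOM = {}
--
-- VARIABLE_DOMAIN = string.ascii_letters
--
--
-- def constant(monom):
--     if monom == K_ZERO_MONOM:
--         return 0
--     return monom.get(K_NAME_FOR_CONSTANT, 1)
--
--
-- def multiorder(monom, all_degrees=False):
--     pool = VARIABLE_DOMAIN if all_degrees else monom
--     return [monom.get(v, 0) for v in pool if v != K_NAME_FOR_CONSTANT]
--
--
-- def is_constant_slot(monom):
--     return not any(multiorder(monom, True))
--
--
-- def poly_update(poly):
--     result = []
--     for monom in poly: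
--         c = constant(monom)
--         if c == 0:
--             continue
--         if sum(multiorder(monom)) != 0:
--             result.append(copy.deepcopy(monom))
--             continue
--         # fold the constant into the first slot that carries no variable orders
--         for i, slot in enumerate(result):
--             if is_constant_slot(slot):
--                 new_c = constant(slot) + c
--                 if new_c == 0:
--                     del result[i]
--                 else:
--                     slot[K_NAME_FOR_CONSTANT] = new_c
--                 break
--         else:
--             result.append({K_NAME_FOR_CONSTANT: c})
--     return result
-- ===== Notes on version B (the rewrite author's own statement) =====
-- stated objective: simpler
-- what changed: Replaces A's generic add() call per constant monom (which deep-copies the whole accumulated list, rescans it with same() and rebuilds it filtering zero constants) with an in-place merge: scan once for the first variable-free slot and update or delete just that entry.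
import Mathlib
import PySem

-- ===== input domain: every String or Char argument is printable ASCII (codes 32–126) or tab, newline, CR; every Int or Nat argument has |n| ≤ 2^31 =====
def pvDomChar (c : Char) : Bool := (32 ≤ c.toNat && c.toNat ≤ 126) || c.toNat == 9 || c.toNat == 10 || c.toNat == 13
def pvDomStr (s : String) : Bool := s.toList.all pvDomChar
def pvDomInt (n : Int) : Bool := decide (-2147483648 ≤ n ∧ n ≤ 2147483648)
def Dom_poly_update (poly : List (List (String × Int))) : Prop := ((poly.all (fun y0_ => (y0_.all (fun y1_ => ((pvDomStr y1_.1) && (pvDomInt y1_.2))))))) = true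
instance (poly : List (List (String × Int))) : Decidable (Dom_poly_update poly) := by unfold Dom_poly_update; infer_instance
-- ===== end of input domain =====

-- B folds each constant monom into the first variable-free slot in place instead of A's
-- `add`, which deep-copies the whole accumulator, rescans it and re-filters it (objective: simpler).

-- ===== PORT A =====
-- shared module helpers (identical in Source A and Source B): K_NAME_FOR_CONSTANT = " ", VARIABLE_DOMAIN, constant, multiorder
def kAsciiLetters : List String := ["a", "b", "c", "d", "e", "f", "g", "h", "i", "j", "k", "l", "m", "n", "o", "p", "q", "r", "s", "t", "u", "v", "w", "x", "y", "z", "A", "B", "C", "D", "E", "F", "G", "H", "I", "J", "K", "L", "M", "N", "O", "P", "Q", "R", "S", "T", "U", "V", "W", "X", "Y", "Z"]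

def constantF (monom : List (String × Int)) : Int :=
  if monom = [] then 0
  else
    match (PySem.Dict.mk monom).get? " " with
    | some v => v
    | none => 1

def multiorderF (monom : List (String × Int)) (all_degrees : Bool) : List Int :=
  let pool : List String := if all_degrees then kAsciiLetters else (PySem.Dict.mk monom).keys
  pool.foldl (fun result v =>
    if v = " " then result
    else result ++ [(PySem.Dict.mk monom).getD v 0]) []

def sameF (m1 m2 : List (String × Int)) (constant_matter : Bool) : Bool :=
  multiorderF m1 true == multiorderF m2 true
    && (!constant_matter || constantF m1 == constantF m2)

-- inner `for monom_result in result: … break` / `if not found: append` of add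
def addLoopF (result : List (List (String × Int))) (ms : List (String × Int)) :
    List (List (String × Int)) :=
  match result with
  | [] => [ms]
  | mr :: rest =>
    if sameF mr ms false then
      ((PySem.Dict.mk mr).insert " " (constantF mr + constantF ms)).items :: rest
    else mr :: addLoopF rest ms

def addF (first second : List (List (String × Int))) : List (List (String × Int)) :=
  let result := second.foldl addLoopF first
  result.foldl (fun final m => if ¬ (constantF m = 0) then final ++ [m] else final) []

def poly_update (poly : List (List (String × Int))) : List (List (String × Int)) :=
  poly.foldl (fun updated monom =>
    if ¬ (constantF monom = 0) then
      if (multiorderF monom false).sum = 0 then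
        addF updated [[(" ", constantF monom)]]
      else updated ++ [monom]
    else updated) []

-- ===== PORT B =====
def zeroOrdersB (m : List (String × Int)) : Bool :=
  !(multiorderF m true).any (fun o => !(o == 0))   -- is_constant_slot: not any(multiorder(m, True))

-- B's inner `for i, slot in enumerate(result): … break / else: append`
def mergeConstB (result : List (List (String × Int))) (c : Int) :
    List (List (String × Int)) :=
  match result with
  | [] => [[(" ", c)]]
  | slot :: rest =>
    if zeroOrdersB slot then
      if constantF slot + c = 0 then rest
      else ((PySem.Dict.mk slot).insert " " (constantF slot + c)).items :: rest
    else slot :: mergeConstB rest c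

def poly_update_alt (poly : List (List (String × Int))) : List (List (String × Int)) :=
  poly.foldl (fun result monom =>
    let c := constantF monom
    if c = 0 then result
    else if ¬ ((multiorderF monom false).sum = 0) then result ++ [monom]
    else mergeConstB result c) []

-- ===== PRECONDITION & SPEC =====
def Spec_poly_update (poly : List (List (String × Int))) (out : List (List (String × Int))) : Prop := out = poly_update_alt poly
instance (poly : List (List (String × Int))) (out : List (List (String × Int))) : Decidable (Spec_poly_update poly out) := by unfold Spec_poly_update; infer_instance

-- ===== CLAIM (what is proved, stated in full; the proofs are below) =====
def Claim_equal_poly_update : Prop := ∀ (poly : List (List (String × Int))), Dom_poly_update poly → Spec_poly_update poly (poly_update poly)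

-- ===== LEMMAS AND PROOFS =====

theorem space_not_mem : " " ∉ kAsciiLetters := by decide

theorem mo_foldl (m : List (String × Int)) (pool : List String) (acc : List Int)
    (h : " " ∉ pool) :
    pool.foldl (fun result v =>
      if v = " " then result
      else result ++ [(PySem.Dict.mk m).getD v 0]) acc
      = acc ++ pool.map (fun v => (PySem.Dict.mk m).getD v 0) := by
  induction pool generalizing acc with
  | nil => simp
  | cons x xs ih =>
    simp only [List.mem_cons, not_or] at h
    rw [List.foldl_cons, if_neg (fun hx => h.1 hx.symm), ih _ h.2]
    simp

theorem mo_true (m : List (String × Int)) :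
    multiorderF m true = kAsciiLetters.map (fun v => (PySem.Dict.mk m).getD v 0) := by
  simpa [multiorderF] using mo_foldl m kAsciiLetters [] space_not_mem

theorem getD_const_monom (c : Int) (v : String) (h : v ≠ " ") :
    (PySem.Dict.mk [(" ", c)]).getD v 0 = 0 := by
  simp [PySem.Dict.getD_eq_get?_getD, (beq_iff_eq).ne.mpr (Ne.symm h),
    PySem.Dict.get?]

theorem letters_ne_space (v : String) (hv : v ∈ kAsciiLetters) : v ≠ " " :=
  fun e => space_not_mem (e ▸ hv)

theorem zeroOrdersB_all (m : List (String × Int)) :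
    zeroOrdersB m = (multiorderF m true).all (fun o => o == 0) := by
  simp [zeroOrdersB, List.all_eq_not_any_not]

theorem same_const (m : List (String × Int)) (c : Int) :
    sameF m [(" ", c)] false = zeroOrdersB m := by
  rw [zeroOrdersB_all]
  simp only [sameF, Bool.not_false, Bool.true_or, Bool.and_true]
  rw [Bool.eq_iff_iff]
  simp only [beq_iff_eq, mo_true, List.map_eq_map_iff, List.all_eq_true, List.mem_map]
  constructor
  · rintro h o ⟨v, hv, rfl⟩
    simp [h v hv, getD_const_monom c v (letters_ne_space v hv)]
  · intro h v hv
    rw [getD_const_monom c v (letters_ne_space v hv)]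
    simpa using h _ ⟨v, hv, rfl⟩

theorem dictmk_items (d : PySem.Dict String Int) : PySem.Dict.mk d.items = d := rfl

theorem insert_items_ne_nil (m : List (String × Int)) (x : Int) :
    ((PySem.Dict.mk m).insert " " x).items ≠ [] := by
  by_cases h : (PySem.Dict.mk m).contains " "
  · rw [PySem.Dict.items_insert_of_contains (h := h)]
    have hm : " " ∈ (PySem.Dict.mk m).keys := (PySem.Dict.contains_iff_mem_keys _ _).mp h
    simp only [PySem.Dict.keys] at hm
    intro hx
    simp only [List.map_eq_nil_iff] at hx
    subst hx
    simp at hm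
  · rw [PySem.Dict.items_insert_of_not_contains
      (h := Bool.eq_false_iff.mpr (fun e => h e))]
    simp

theorem constantF_insert (m : List (String × Int)) (x : Int) :
    constantF ((PySem.Dict.mk m).insert " " x).items = x := by
  unfold constantF
  rw [if_neg (insert_items_ne_nil m x), dictmk_items, PySem.Dict.get?_insert_self]

theorem constantF_const_monom (c : Int) : constantF [(" ", c)] = c := by
  simp [constantF, PySem.Dict.get?_mk_cons]

-- A's final filter loop
theorem filter_loop (l acc : List (List (String × Int))) :
    l.foldl (fun final m => if ¬ (constantF m = 0) then final ++ [m] else final) acc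
      = acc ++ l.filter (fun m => !(constantF m == 0)) := by
  induction l generalizing acc with
  | nil => simp
  | cons x xs ih =>
    by_cases h : constantF x = 0
    · rw [List.foldl_cons, if_neg (by simpa using h), ih]
      simp [h]
    · rw [List.foldl_cons, if_pos (by simpa using h), ih]
      simp [h]

theorem filter_all (l : List (List (String × Int)))
    (h : ∀ m ∈ l, ¬ constantF m = 0) :
    l.filter (fun m => !(constantF m == 0)) = l := by
  rw [List.filter_eq_self]
  intro a ha
  simpa using h a ha

-- A's add on a single constant monom is exactly B's in-place merge
theorem add_eq_merge (res : List (List (String × Int))) (c : Int)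
    (hres : ∀ m ∈ res, ¬ constantF m = 0) (hc : ¬ c = 0) :
    addF res [[(" ", c)]] = mergeConstB res c := by
  induction res with
  | nil =>
    simp only [addF, List.foldl_cons, List.foldl_nil, addLoopF, mergeConstB]
    simp [constantF_const_monom, hc]
  | cons mr rest ih =>
    have hmr : ¬ constantF mr = 0 := hres mr (by simp)
    have hrest : ∀ m ∈ rest, ¬ constantF m = 0 := fun m hm => hres m (by simp [hm])
    simp only [addF, List.foldl_cons, List.foldl_nil, addLoopF, same_const,
      constantF_const_monom, mergeConstB]
    by_cases hz : zeroOrdersB mr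
    · rw [if_pos hz, if_pos hz, filter_loop]
      simp only [List.nil_append, List.filter_cons, constantF_insert]
      by_cases h0 : constantF mr + c = 0
      · simp [h0, filter_all rest hrest]
      · simp [h0, filter_all rest hrest]
    · rw [if_neg (by simpa using hz), if_neg (by simpa using hz), filter_loop,
        List.filter_cons_of_pos (by simpa using hmr)]
      have ihr := ih hrest
      simp only [addF, List.foldl_cons, List.foldl_nil] at ihr
      rw [filter_loop] at ihr
      simp only [List.nil_append] at ihr ⊢
      rw [ihr]

theorem mergeConstB_const_ne (res : List (List (String × Int))) (c : Int)
    (hres : ∀ m ∈ res, ¬ constantF m = 0) (hc : ¬ c = 0) :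
    ∀ m ∈ mergeConstB res c, ¬ constantF m = 0 := by
  induction res with
  | nil =>
    intro m hm
    simp only [mergeConstB, List.mem_singleton] at hm
    rw [hm, constantF_const_monom]; exact hc
  | cons slot rest ih =>
    have hslot : ¬ constantF slot = 0 := hres slot (by simp)
    have hrest : ∀ m ∈ rest, ¬ constantF m = 0 := fun m hm => hres m (by simp [hm])
    intro m hm
    simp only [mergeConstB] at hm
    by_cases hz : zeroOrdersB slot
    · rw [if_pos hz] at hm
      by_cases h0 : constantF slot + c = 0
      · rw [if_pos h0] at hm; exact hrest m hm
      · rw [if_neg h0] at hm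
        rcases List.mem_cons.mp hm with hm | hm
        · rw [hm, constantF_insert]; exact h0
        · exact hrest m hm
    · rw [if_neg hz] at hm
      rcases List.mem_cons.mp hm with hm | hm
      · rw [hm]; exact hslot
      · exact ih hrest m hm

theorem foldl_eq (poly : List (List (String × Int)))
    (acc : List (List (String × Int))) (h : ∀ m ∈ acc, ¬ constantF m = 0) :
    poly.foldl (fun updated monom =>
      if ¬ (constantF monom = 0) then
        if (multiorderF monom false).sum = 0 then
          addF updated [[(" ", constantF monom)]]
        else updated ++ [monom]
      else updated) acc
    = poly.foldl (fun result monom =>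
        let c := constantF monom
        if c = 0 then result
        else if ¬ ((multiorderF monom false).sum = 0) then result ++ [monom]
        else mergeConstB result c) acc := by
  induction poly generalizing acc with
  | nil => rfl
  | cons monom rest ih =>
    simp only [List.foldl_cons]
    by_cases hc : constantF monom = 0
    · rw [if_neg (by simpa using hc), if_pos hc]
      exact ih acc h
    · rw [if_pos hc, if_neg hc]
      by_cases hs : (multiorderF monom false).sum = 0
      · rw [if_pos hs, if_neg (by simpa using hs), add_eq_merge acc _ h hc]
        exact ih _ (mergeConstB_const_ne acc _ h hc)
      · rw [if_neg hs, if_pos (by simpa using hs)]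
        refine ih _ ?_
        intro m hm
        rcases List.mem_append.mp hm with hm | hm
        · exact h m hm
        · simp only [List.mem_singleton] at hm
          rw [hm]; exact hc

-- ===== VERDICT (by name: the statement is the Claim_ definition above) =====
theorem poly_update_spec : Claim_equal_poly_update := by
  intro poly _
  unfold Spec_poly_update poly_update poly_update_alt
  exact foldl_eq poly [] (by simp)
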